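-- pv_equiv track=rewrite | github.com/knights77787-ai/underdog | Backend/App/Services/keyword_detector.py | _merge_rules_with_extra
-- ===== SOURCE A (Python) =====
-- from typing import Literal
--
-- _EVENT_TYPE_ORDER: tuple[Literal["danger", "caution", "alert"], ...] = ("danger", "caution", "alert")
--
-- def _merge_rules_with_extra(
--     base: list[tuple[str, Literal["danger", "caution", "alert"], str]],
--     extra: list[tuple[str, Literal["danger", "caution", "alert"], str]],
-- ) -> list[tuple[str, Literal["danger", "caution", "alert"], str]]:
--     """같은 event_type 안에서는 JSON 기본 규칙을 먼저, 사용자 등록 구문을 뒤에 둔다."""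
--     by_et: dict[str, list[tuple[str, Literal["danger", "caution", "alert"], str]]] = {
--         "danger": [],
--         "caution": [],
--         "alert": [],
--     }
--     for p, e, c in base:
--         if e in by_et:
--             by_et[e].append((p, e, c))
--     for p, e, c in extra:
--         if e in by_et:
--             by_et[e].append((p, e, c))
--     out: list[tuple[str, Literal["danger", "caution", "alert"], str]] = []
--     for et in _EVENT_TYPE_ORDER:
--         out.extend(by_et[et])
--     return out
-- ===== SOURCE B (Python) =====
-- def _merge_rules_with_extra(base, extra):
--     out = []
--     for et in ("danger", "caution", "alert"):
--         out += [(p, e, c) for (p, e, c) in base if e == et]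
--         out += [(p, e, c) for (p, e, c) in extra if e == et]
--     return out
-- ===== Notes on version B (the rewrite author's own statement) =====
-- stated objective: simpler
-- what changed: Drops the by_et bucket dict entirely: loops over the event-type order as the outer loop and filters base then extra per event type, instead of grouping once into a dict and concatenating buckets.
import Mathlib
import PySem

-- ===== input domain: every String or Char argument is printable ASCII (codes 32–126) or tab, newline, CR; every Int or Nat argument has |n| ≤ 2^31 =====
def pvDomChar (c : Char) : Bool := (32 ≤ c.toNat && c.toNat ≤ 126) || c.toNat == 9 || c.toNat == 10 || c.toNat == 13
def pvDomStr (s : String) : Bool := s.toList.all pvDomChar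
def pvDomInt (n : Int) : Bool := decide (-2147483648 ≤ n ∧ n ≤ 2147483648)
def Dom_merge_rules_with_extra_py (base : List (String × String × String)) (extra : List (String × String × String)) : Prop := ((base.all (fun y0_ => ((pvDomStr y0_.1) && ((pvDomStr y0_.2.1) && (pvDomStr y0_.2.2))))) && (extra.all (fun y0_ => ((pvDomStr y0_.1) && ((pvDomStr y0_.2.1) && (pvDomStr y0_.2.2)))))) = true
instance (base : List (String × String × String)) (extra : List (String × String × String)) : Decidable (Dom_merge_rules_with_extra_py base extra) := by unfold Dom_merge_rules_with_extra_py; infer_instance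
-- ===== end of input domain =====

-- B drops A's by_et bucket dict: it loops over the event-type order and filters base then extra
-- per event type (simpler decomposition, same O(n·3) cost class).

-- ===== PORT A =====
-- one loop pass of A: 'if e in by_et: by_et[e].append((p, e, c))'
def mergeRulesStep (d : PySem.Dict String (List (String × String × String)))
    (t : String × String × String) : PySem.Dict String (List (String × String × String)) :=
  if d.contains t.2.1 then d.modify t.2.1 [] (fun l => l ++ [t]) else d

def merge_rules_with_extra_py (base : List (String × String × String)) (extra : List (String × String × String)) : List (String × String × String) :=
  let by_et : PySem.Dict String (List (String × String × String)) :=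
    PySem.Dict.ofList [("danger", []), ("caution", []), ("alert", [])]
  let by_et := base.foldl mergeRulesStep by_et
  let by_et := extra.foldl mergeRulesStep by_et
  -- 'by_et[et]': the three keys are always present, so getD never takes its default
  (["danger", "caution", "alert"] : List String).foldl (fun out et => out ++ by_et.getD et []) []

-- ===== PORT B =====
def merge_rules_with_extra_py_alt (base : List (String × String × String)) (extra : List (String × String × String)) : List (String × String × String) :=
  (["danger", "caution", "alert"] : List String).foldl
    (fun out et => out ++ base.filter (fun t => t.2.1 == et) ++ extra.filter (fun t => t.2.1 == et)) []

-- ===== PRECONDITION & SPEC =====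
def Spec_merge_rules_with_extra_py (base : List (String × String × String)) (extra : List (String × String × String)) (out : List (String × String × String)) : Prop := out = merge_rules_with_extra_py_alt base extra
instance (base : List (String × String × String)) (extra : List (String × String × String)) (out : List (String × String × String)) : Decidable (Spec_merge_rules_with_extra_py base extra out) := by unfold Spec_merge_rules_with_extra_py; infer_instance

-- ===== CLAIM (what is proved, stated in full; the proofs are below) =====
def Claim_equal_merge_rules_with_extra_py : Prop := ∀ (base : List (String × String × String)) (extra : List (String × String × String)), Dom_merge_rules_with_extra_py base extra → Spec_merge_rules_with_extra_py base extra (merge_rules_with_extra_py base extra)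

-- ===== LEMMAS AND PROOFS =====

-- the append loop never removes a key that is present
theorem contains_mergeRulesStep (d : PySem.Dict String (List (String × String × String)))
    (t : String × String × String) (k : String) (hk : d.contains k = true) :
    (mergeRulesStep d t).contains k = true := by
  unfold mergeRulesStep
  split_ifs with h
  · rw [PySem.Dict.contains_modify]
    simp [hk]
  · exact hk

theorem contains_foldl (xs : List (String × String × String))
    (d : PySem.Dict String (List (String × String × String))) (k : String)
    (hk : d.contains k = true) : (xs.foldl mergeRulesStep d).contains k = true := by
  induction xs generalizing d with
  | nil => exact hk
  | cons t rest ih => exact ih _ (contains_mergeRulesStep d t k hk)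

-- bucket invariant: each pass appends exactly the tuples whose event type is k
theorem bucket_foldl (xs : List (String × String × String))
    (d : PySem.Dict String (List (String × String × String))) (k : String)
    (hk : d.contains k = true) :
    (xs.foldl mergeRulesStep d).getD k [] = d.getD k [] ++ xs.filter (fun t => t.2.1 == k) := by
  induction xs generalizing d with
  | nil => simp
  | cons t rest ih =>
    rw [List.foldl_cons, ih (mergeRulesStep d t) (contains_mergeRulesStep d t k hk)]
    rw [List.filter_cons]
    by_cases ht : t.2.1 = k
    · subst ht
      simp only [mergeRulesStep, hk, if_true, beq_self_eq_true]
      rw [PySem.Dict.getD_modify_self]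
      simp
    · have hstep : (mergeRulesStep d t).getD k [] = d.getD k [] := by
        unfold mergeRulesStep
        split_ifs with h
        · exact PySem.Dict.getD_modify_of_ne d [] _ (Ne.symm ht)
        · rfl
      simp [hstep, ht]

theorem bucket_final (base extra : List (String × String × String)) (k : String)
    (hk : (PySem.Dict.ofList ([("danger", []), ("caution", []), ("alert", [])] :
      List (String × List (String × String × String)))).contains k = true)
    (h0 : (PySem.Dict.ofList ([("danger", []), ("caution", []), ("alert", [])] :
      List (String × List (String × String × String)))).getD k [] = []) :
    ((extra.foldl mergeRulesStep (base.foldl mergeRulesStep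
      (PySem.Dict.ofList [("danger", []), ("caution", []), ("alert", [])]))).getD k []) =
    base.filter (fun t => t.2.1 == k) ++ extra.filter (fun t => t.2.1 == k) := by
  rw [bucket_foldl extra _ k (contains_foldl base _ k hk), bucket_foldl base _ k hk, h0]
  simp

-- ===== VERDICT (by name: the statement is the Claim_ definition above) =====
theorem merge_rules_with_extra_py_spec : Claim_equal_merge_rules_with_extra_py := by
  intro base extra _
  unfold Spec_merge_rules_with_extra_py merge_rules_with_extra_py merge_rules_with_extra_py_alt
  simp only [List.foldl_cons, List.foldl_nil, List.nil_append]
  rw [bucket_final base extra "danger" (by decide) (by decide),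
      bucket_final base extra "caution" (by decide) (by decide),
      bucket_final base extra "alert" (by decide) (by decide)]
  simp [List.append_assoc]
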